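-- pv_equiv track=rewrite | github.com/fuleatraian/RDS-project | Functions.py | area_generator
-- ===== SOURCE A (Python) =====
-- def area_generator(n):
--     i = 0
--     values = list()
--     postcode = ["HP510ES", "HP260ES", "LN831NE", "LN208NE", "LN382NE", "TX135SW", "TX420SW",
--                  "PD136NW", "PD813NW", "MD824NW", "MD981NW", "MK181SE"]
--     while i < n:
--         area_postcode = postcode[0]
--         postcode.remove(area_postcode)
--         if area_postcode in ["HP510ES", "HP260ES"]:
--             city_id = 2
--         elif area_postcode in ["LN831NE", "LN208NE", "LN382NE"]:
--             city_id = 7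
--         elif area_postcode in ["TX135SW", "TX420SW", "PD136NW", "PD813NW"]:
--             city_id = 8
--         else:
--             city_id = 5
--         values.append((area_postcode, city_id))
--         i += 1
--     return values
-- ===== SOURCE B (Python) =====
-- # B: precomputed static (postcode, city_id) table; index it for i in range(n).
-- # Same IndexError as A when n > 12 (excluded by Pre_).
-- _TABLE = [("HP510ES", 2), ("HP260ES", 2), ("LN831NE", 7), ("LN208NE", 7),
--           ("LN382NE", 7), ("TX135SW", 8), ("TX420SW", 8), ("PD136NW", 8),
--           ("PD813NW", 8), ("MD824NW", 5), ("MD981NW", 5), ("MK181SE", 5)]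
--
-- def area_generator(n):
--     return [_TABLE[i] for i in range(n)]
-- ===== Notes on version B (the rewrite author's own statement) =====
-- stated objective: simpler
-- what changed: Replaced the while-loop that mutates the postcode list and re-classifies each head through chained membership tests by a precomputed static (postcode, city_id) table indexed over range(n).
-- outside the precondition, e.g. on area_generator(13): A raises IndexError, B raises IndexError
import Mathlib
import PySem

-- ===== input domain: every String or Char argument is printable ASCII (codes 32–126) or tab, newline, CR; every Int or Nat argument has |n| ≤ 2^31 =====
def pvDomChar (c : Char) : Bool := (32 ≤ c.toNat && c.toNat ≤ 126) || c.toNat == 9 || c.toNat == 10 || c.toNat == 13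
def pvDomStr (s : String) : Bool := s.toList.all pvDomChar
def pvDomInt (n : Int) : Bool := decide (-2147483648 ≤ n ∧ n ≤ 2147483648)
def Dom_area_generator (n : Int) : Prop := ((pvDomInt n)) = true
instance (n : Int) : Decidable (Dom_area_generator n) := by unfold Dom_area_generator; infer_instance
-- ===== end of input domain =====

-- B replaces A's mutating while-loop and chained membership classification by a
-- precomputed static table indexed over range(n) (objective: simpler).

-- ===== PORT A =====
-- A's while loop: i counts up to n, postcode[0] is popped (remove of the head),
-- classified by membership, appended to values.
def areaLoop (i n : Int) (pc : List String) (values : List (String × Int)) :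
    List (String × Int) :=
  if _h : i < n then
    match pc with
    | [] => values  -- Python raises IndexError here (excluded by Pre_)
    | p :: rest =>
      let city_id : Int :=
        if p = "HP510ES" ∨ p = "HP260ES" then 2
        else if p = "LN831NE" ∨ p = "LN208NE" ∨ p = "LN382NE" then 7
        else if p = "TX135SW" ∨ p = "TX420SW" ∨ p = "PD136NW" ∨ p = "PD813NW" then 8
        else 5
      areaLoop (i + 1) n rest (values ++ [(p, city_id)])
  else values
termination_by (n - i).toNat
decreasing_by omega

def area_generator (n : Int) : List (String × Int) :=
  areaLoop 0 n
    ["HP510ES", "HP260ES", "LN831NE", "LN208NE", "LN382NE", "TX135SW", "TX420SW",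
     "PD136NW", "PD813NW", "MD824NW", "MD981NW", "MK181SE"] []

-- ===== PORT B =====
def pvTable : List (String × Int) :=
  [("HP510ES", 2), ("HP260ES", 2), ("LN831NE", 7), ("LN208NE", 7),
   ("LN382NE", 7), ("TX135SW", 8), ("TX420SW", 8), ("PD136NW", 8),
   ("PD813NW", 8), ("MD824NW", 5), ("MD981NW", 5), ("MK181SE", 5)]

def area_generator_alt (n : Int) : List (String × Int) :=
  (PySem.List.pyRange 0 n 1).map (fun i => PySem.List.pyGetD pvTable i ("", 0))

-- ===== PRECONDITION & SPEC =====
-- Pre_ excludes n > 12, where A (and B) raise IndexError on the exhausted table.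
def Pre_area_generator (n : Int) : Prop := n ≤ 12
instance (n : Int) : Decidable (Pre_area_generator n) := by unfold Pre_area_generator; infer_instance
def pvWitness_area_generator : Int := (5)

def Spec_area_generator (n : Int) (out : List (String × Int)) : Prop := out = area_generator_alt n
instance (n : Int) (out : List (String × Int)) : Decidable (Spec_area_generator n out) := by unfold Spec_area_generator; infer_instance

-- ===== CLAIM (what is proved, stated in full; the proofs are below) =====
def Claim_equal_area_generator : Prop := ∀ (n : Int), Dom_area_generator n → Pre_area_generator n → Spec_area_generator n (area_generator n)

-- ===== LEMMAS AND PROOFS =====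
theorem areaLoop_nonpos (i n : Int) (pc : List String) (vs : List (String × Int))
    (h : ¬ i < n) : areaLoop i n pc vs = vs := by
  rw [areaLoop.eq_def]; simp only [h, dite_false]

theorem alt_nonpos (n : Int) (h : n ≤ 0) : area_generator_alt n = [] := by
  unfold area_generator_alt
  rw [PySem.List.pyRange_one]
  simp
  omega

-- ===== VERDICT (by name: the statement is the Claim_ definition above) =====
theorem area_generator_spec : Claim_equal_area_generator := by
  intro n _ hpre
  unfold Spec_area_generator
  by_cases hn : n ≤ 0
  · rw [alt_nonpos n hn]
    unfold area_generator
    exact areaLoop_nonpos _ _ _ _ (by omega)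
  · unfold Pre_area_generator at hpre
    have h1 : 1 ≤ n := by omega
    interval_cases n <;> (simp only [area_generator, areaLoop]; decide)
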